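-- pv_equiv track=rewrite | github.com/Honey-B4dger/python | games/connect4/slicer.py | all_slices
-- ===== SOURCE A (Python) =====
-- def d_slicer(grid_input, direction):
--     result_temp = []
--     l = list(range(len(grid_input[0])))
--     r = l[:]
--     r.reverse()
--     if direction == 'nw':
--         pass
--     if direction == 'ne':
--         l.reverse()
--         r.reverse()
--
--     for row in grid_input:
--         row_temp = ['0' for i in range(l.pop())]
--         row_temp += row
--         row_temp += ['0' for i in range(r.pop())]
--         result_temp.append(row_temp)
--
--     result = []
--     for x, columns in enumerate(result_temp[0]):
--         result.append([row[x] for row in result_temp])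
--
--
--     return result
--
-- def all_slices(grid):
--     result = []
--     result += d_slicer(grid, 'nw')
--     result += d_slicer(grid, 'ne')
--     for row in grid:
--         result.append(row)
--
--     for column in  range(3):
--         result.append([row[column] for row in grid])
--
--     return result
-- ===== SOURCE B (Python) =====
-- def all_slices(grid):
--     rows, cols = len(grid), len(grid[0])
--
--     def diag(shift):
--         out = []
--         for x in range(2 * cols - 1):
--             col = []
--             for i in range(rows):
--                 c = shift(x, i)
--                 col.append(grid[i][c] if 0 <= c < len(grid[i]) else '0')
--             out.append(col)
--         return out
--
--     nw = diag(lambda x, i: x - (cols - 1 - i))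
--     ne = diag(lambda x, i: x - i)
--     return nw + ne + list(grid) + [[row[c] for row in grid] for c in range(3)]
-- ===== Notes on version B (the rewrite author's own statement) =====
-- stated objective: simpler
-- what changed: B computes each diagonal entry directly by index arithmetic (grid[i][x-offset] with '0' when out of range) instead of building a zero-padded intermediate matrix via two pop lists and then transposing it.
import Mathlib
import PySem

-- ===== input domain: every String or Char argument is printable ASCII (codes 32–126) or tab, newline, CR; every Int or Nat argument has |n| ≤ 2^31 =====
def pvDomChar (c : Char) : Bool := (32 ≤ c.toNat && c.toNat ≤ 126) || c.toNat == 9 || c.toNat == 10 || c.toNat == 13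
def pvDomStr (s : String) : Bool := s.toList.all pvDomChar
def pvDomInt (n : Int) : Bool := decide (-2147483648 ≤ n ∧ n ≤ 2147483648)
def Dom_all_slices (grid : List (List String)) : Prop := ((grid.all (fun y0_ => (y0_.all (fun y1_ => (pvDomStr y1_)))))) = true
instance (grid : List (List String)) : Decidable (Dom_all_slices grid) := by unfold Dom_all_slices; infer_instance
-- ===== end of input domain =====

-- B replaces A's padded intermediate matrix + transpose by direct index arithmetic per diagonal entry; same asymptotic cost, simpler code.

-- ===== PORT A =====
-- the for-loop over grid popping from l and r and appending padded rows;
-- l.pop() raises IndexError on an empty list: outside Pre_, getD 0 there.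
def pvBuildRows : List (List String) → List Int → List Int → List (List String)
  | [], _, _ => []
  | row :: rest, l, r =>
    (List.replicate ((l.getLast?.getD 0).toNat) "0" ++ row
      ++ List.replicate ((r.getLast?.getD 0).toNat) "0")
      :: pvBuildRows rest l.dropLast r.dropLast

def d_slicer (grid_input : List (List String)) (direction : String) : List (List String) :=
  -- l = list(range(len(grid_input[0]))); grid_input[0] raises on []: outside Pre_
  let l := PySem.List.pyRange 0 ((grid_input.headD []).length : Int) 1
  let r := l.reverse
  let l := if direction == "ne" then l.reverse else l
  let r := if direction == "ne" then r.reverse else r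
  let result_temp := pvBuildRows grid_input l r
  -- for x, _ in enumerate(result_temp[0]): [row[x] for row in result_temp];
  -- row[x] raises when x ≥ len(row): outside Pre_, default "0" there
  (List.range (result_temp.headD []).length).map
    (fun x => result_temp.map (fun row => row.getD x "0"))

def all_slices (grid : List (List String)) : List (List String) :=
  d_slicer grid "nw" ++ d_slicer grid "ne" ++ grid
    ++ (List.range 3).map (fun column => grid.map (fun row => row.getD column "0"))

-- ===== PORT B =====
def pvDiag (grid : List (List String)) (rows cols : Nat) (shift : Nat → Nat → Int) : List (List String) :=
  (List.range (2 * cols - 1)).map (fun x =>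
    (List.range rows).map (fun i =>
      let row := grid.getD i []
      let c := shift x i
      if 0 ≤ c ∧ c < (row.length : Int) then row.getD c.toNat "0" else "0"))

def all_slices_alt (grid : List (List String)) : List (List String) :=
  let rows := grid.length
  let cols := (grid.headD []).length
  pvDiag grid rows cols (fun x i => (x : Int) - ((cols : Int) - 1 - (i : Int)))
    ++ pvDiag grid rows cols (fun x i => (x : Int) - (i : Int))
    ++ grid
    ++ (List.range 3).map (fun column => grid.map (fun row => row.getD column "0"))

-- ===== PRECONDITION & SPEC =====
-- Pre_ is exactly where the Python A returns: A raises IndexError on an empty grid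
-- (grid[0]), when rows > cols (popping an exhausted l/r), when some row is shorter
-- than the first row (the transpose indexes every padded row up to width 2*cols-1),
-- and when the first row has fewer than 3 entries (the vertical-column loop).
def Pre_all_slices (grid : List (List String)) : Prop :=
  grid ≠ [] ∧ 3 ≤ (grid.headD []).length ∧ grid.length ≤ (grid.headD []).length ∧
    ∀ row ∈ grid, (grid.headD []).length ≤ row.length
instance (grid : List (List String)) : Decidable (Pre_all_slices grid) := by unfold Pre_all_slices; infer_instance
def pvWitness_all_slices : List (List String) :=
  [["a", "b", "c"], ["d", "e", "f"], ["g", "h", "i"]]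

def Spec_all_slices (grid : List (List String)) (out : List (List String)) : Prop := out = all_slices_alt grid
instance (grid : List (List String)) (out : List (List String)) : Decidable (Spec_all_slices grid out) := by unfold Spec_all_slices; infer_instance

-- ===== CLAIM (what is proved, stated in full; the proofs are below) =====
def Claim_equal_all_slices : Prop := ∀ (grid : List (List String)), Dom_all_slices grid → Pre_all_slices grid → Spec_all_slices grid (all_slices grid)

-- ===== LEMMAS AND PROOFS =====

theorem pvDropRange (i cols : Nat) (h : i ≤ cols) :
  (PySem.List.pyRange 0 (cols:Int) 1).drop i = PySem.List.pyRange (i:Int) (cols:Int) 1 := by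
  rw [PySem.List.pyRange_one_append 0 (i:Int) (cols:Int) (by omega) (by omega)]
  exact List.drop_left' (by simp [PySem.List.length_pyRange_one])

theorem build_nw (rest : List (List String)) (i cols : Nat)
    (h : i + rest.length ≤ cols) :
    pvBuildRows rest (PySem.List.pyRange 0 ((cols : Int) - i) 1)
      (((PySem.List.pyRange 0 (cols : Int) 1).drop i).reverse)
    = rest.mapIdx (fun k row =>
        List.replicate (cols - 1 - (i + k)) "0" ++ row ++ List.replicate (i + k) "0") := by
  induction rest generalizing i with
  | nil => simp [pvBuildRows]
  | cons row rest ih =>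
    simp only [List.length_cons] at h
    have hi : i < cols := by omega
    have hcast : (cols : Int) - i = ((cols - i : Nat) : Int) := by omega
    -- l = pyRange 0 (cols-i) = pyRange 0 (cols-i-1) ++ [cols-i-1]
    have hl : PySem.List.pyRange 0 ((cols : Int) - i) 1
        = PySem.List.pyRange 0 ((cols : Int) - i - 1) 1 ++ [(cols : Int) - i - 1] := by
      have := PySem.List.pyRange_one_succ_right (a := 0) (b := (cols:Int) - i - 1) (by omega)
      rw [show ((cols:Int)-i-1)+1 = (cols:Int)-i by ring] at this
      exact this
    -- r = ((pyRange i cols)).reverse = (pyRange (i+1) cols).reverse ++ [i]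
    have hr : ((PySem.List.pyRange 0 (cols : Int) 1).drop i).reverse
        = ((PySem.List.pyRange 0 (cols : Int) 1).drop (i+1)).reverse ++ [(i:Int)] := by
      rw [pvDropRange i cols (by omega), pvDropRange (i+1) cols (by omega)]
      rw [PySem.List.pyRange_one_cons (a := (i:Int)) (b := (cols:Int)) (by omega)]
      push_cast
      simp
    rw [pvBuildRows, hl, hr]
    simp only [List.dropLast_concat, List.getLast?_concat, Option.getD_some]
    rw [List.mapIdx_cons]
    have e1 : ((cols:Int) - i - 1).toNat = cols - 1 - (i+0) := by omega
    have e2 : ((i:Int)).toNat = i + 0 := by omega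
    rw [e1, e2,
      show (cols:Int) - ↑i - 1 = (cols:Int) - ↑(i+1) by push_cast; ring,
      ih (i+1) (by omega)]
    have e3 : ∀ k : Nat, (i+1)+k = i+(k+1) := fun k => by omega
    simp [e3]

theorem build_ne (rest : List (List String)) (i cols : Nat)
    (h : i + rest.length ≤ cols) :
    pvBuildRows rest (((PySem.List.pyRange 0 (cols : Int) 1).drop i).reverse)
      (PySem.List.pyRange 0 ((cols : Int) - i) 1)
    = rest.mapIdx (fun k row =>
        List.replicate (i + k) "0" ++ row ++ List.replicate (cols - 1 - (i + k)) "0") := by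
  induction rest generalizing i with
  | nil => simp [pvBuildRows]
  | cons row rest ih =>
    simp only [List.length_cons] at h
    have hi : i < cols := by omega
    have hl : PySem.List.pyRange 0 ((cols : Int) - i) 1
        = PySem.List.pyRange 0 ((cols : Int) - i - 1) 1 ++ [(cols : Int) - i - 1] := by
      have := PySem.List.pyRange_one_succ_right (a := 0) (b := (cols:Int) - i - 1) (by omega)
      rw [show ((cols:Int)-i-1)+1 = (cols:Int)-i by ring] at this
      exact this
    have hr : ((PySem.List.pyRange 0 (cols : Int) 1).drop i).reverse
        = ((PySem.List.pyRange 0 (cols : Int) 1).drop (i+1)).reverse ++ [(i:Int)] := by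
      rw [pvDropRange i cols (by omega), pvDropRange (i+1) cols (by omega)]
      rw [PySem.List.pyRange_one_cons (a := (i:Int)) (b := (cols:Int)) (by omega)]
      push_cast
      simp
    rw [pvBuildRows, hl, hr]
    simp only [List.dropLast_concat, List.getLast?_concat, Option.getD_some]
    rw [List.mapIdx_cons]
    have e1 : ((cols:Int) - i - 1).toNat = cols - 1 - (i+0) := by omega
    have e2 : ((i:Int)).toNat = i + 0 := by omega
    rw [e1, e2,
      show (cols:Int) - ↑i - 1 = (cols:Int) - ↑(i+1) by push_cast; ring,
      ih (i+1) (by omega)]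
    have e3 : ∀ k : Nat, (i+1)+k = i+(k+1) := fun k => by omega
    simp [e3]

theorem pvReplicateGetD (n m : Nat) : (List.replicate n "0").getD m "0" = "0" := by
  simp only [List.getD, List.getElem?_replicate]
  split <;> rfl

theorem point (row : List String) (p q x : Nat) :
    (List.replicate p "0" ++ row ++ List.replicate q "0").getD x "0"
    = if 0 ≤ (x:Int) - (p:Int) ∧ (x:Int) - (p:Int) < (row.length:Int)
      then row.getD ((x:Int) - (p:Int)).toNat "0" else "0" := by
  rw [List.append_assoc]
  by_cases h1 : x < p
  · rw [List.getD_append _ _ _ _ (by simpa using h1)]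
    rw [pvReplicateGetD, if_neg (by omega)]
  · rw [List.getD_append_right _ _ _ _ (by simpa using h1)]
    simp only [List.length_replicate]
    by_cases h2 : x - p < row.length
    · rw [List.getD_append _ _ _ _ h2, if_pos (by omega)]
      congr 1
      omega
    · rw [List.getD_append_right _ _ _ _ (by omega), pvReplicateGetD, if_neg (by omega)]

theorem dslicer_nw (g0 : List String) (gt : List (List String))
    (hrc : (g0 :: gt).length ≤ g0.length) (h3 : 3 ≤ g0.length) :
    d_slicer (g0 :: gt) "nw"
    = pvDiag (g0 :: gt) (g0 :: gt).length g0.length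
        (fun x i => (x : Int) - ((g0.length : Int) - 1 - (i : Int))) := by
  have hb : pvBuildRows (g0 :: gt) (PySem.List.pyRange 0 ((g0.length : Int)) 1)
      ((PySem.List.pyRange 0 ((g0.length : Int)) 1).reverse)
      = (g0 :: gt).mapIdx (fun k row =>
          List.replicate (g0.length - 1 - k) "0" ++ row ++ List.replicate k "0") := by
    have := build_nw (g0 :: gt) 0 g0.length (by simpa using hrc)
    simpa using this
  unfold d_slicer
  simp only [List.headD_cons, show ("nw" == "ne") = false from rfl, Bool.false_eq_true, if_false, hb]
  rw [show (((g0 :: gt).mapIdx (fun k row =>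
        List.replicate (g0.length - 1 - k) "0" ++ row ++ List.replicate k "0")).headD []).length
      = 2 * g0.length - 1 from by
    rw [List.mapIdx_cons, List.headD_cons]
    simp only [List.length_append, List.length_replicate]
    omega]
  unfold pvDiag
  apply List.map_congr_left
  intro x hx
  apply List.ext_getElem (by simp)
  intro i hi1 hi2
  simp only [List.getElem_map, List.getElem_mapIdx, List.getElem_range]
  have hiL : i < g0.length := by
    simp only [List.length_map, List.length_mapIdx, List.length_cons] at hi1
    simp only [List.length_cons] at hrc
    omega
  have hc : ((g0.length : Int) - 1 - (i : Int)) = ((g0.length - 1 - i : Nat) : Int) := by omega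
  simp only [hc, List.getD_eq_getElem (g0 :: gt) [] (by simpa using hi1)]
  rw [point]

theorem dslicer_ne (g0 : List String) (gt : List (List String))
    (hrc : (g0 :: gt).length ≤ g0.length) (h3 : 3 ≤ g0.length) :
    d_slicer (g0 :: gt) "ne"
    = pvDiag (g0 :: gt) (g0 :: gt).length g0.length
        (fun x i => (x : Int) - (i : Int)) := by
  have hb : pvBuildRows (g0 :: gt) ((PySem.List.pyRange 0 ((g0.length : Int)) 1).reverse)
      (PySem.List.pyRange 0 ((g0.length : Int)) 1)
      = (g0 :: gt).mapIdx (fun k row =>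
          List.replicate k "0" ++ row ++ List.replicate (g0.length - 1 - k) "0") := by
    have := build_ne (g0 :: gt) 0 g0.length (by simpa using hrc)
    simpa using this
  unfold d_slicer
  simp only [List.headD_cons, show ("ne" == "ne") = true from rfl, if_true, List.reverse_reverse, hb]
  rw [show (((g0 :: gt).mapIdx (fun k row =>
        List.replicate k "0" ++ row ++ List.replicate (g0.length - 1 - k) "0")).headD []).length
      = 2 * g0.length - 1 from by
    rw [List.mapIdx_cons, List.headD_cons]
    simp only [List.length_append, List.length_replicate]
    omega]
  unfold pvDiag
  apply List.map_congr_left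
  intro x hx
  apply List.ext_getElem (by simp)
  intro i hi1 hi2
  simp only [List.getElem_map, List.getElem_mapIdx, List.getElem_range]
  simp only [List.getD_eq_getElem (g0 :: gt) [] (by simpa using hi1)]
  rw [point]

-- ===== VERDICT (by name: the statement is the Claim_ definition above) =====
theorem all_slices_spec : Claim_equal_all_slices := by
  intro grid _ hpre
  obtain ⟨hne, h3, hrc, -⟩ := hpre
  obtain ⟨g0, gt, rfl⟩ := List.exists_cons_of_ne_nil hne
  simp only [List.headD_cons] at h3 hrc
  unfold Spec_all_slices all_slices all_slices_alt
  simp only [List.headD_cons]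
  rw [dslicer_nw g0 gt hrc h3, dslicer_ne g0 gt hrc h3]
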